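-- pv_equiv track=rewrite | github.com/msg430/Project-Euler | problem676.py | possibleSums
-- ===== SOURCE A (Python) =====
-- def combinations(tops):
--     try:
--         currentTop = tops.pop()
--         deeper = combinations(tops)
--         for rest in deeper:
--             for k in range(currentTop+1):
--                 yield rest + [k]
--     except IndexError:
--         yield []
--
-- def possibleSums(values):
--     combos = combinations([1]*len(values))
--     possibles = set()
--     for combo in combos:
--         currentSum = 0
--         for x in range(len(combo)):
--             currentSum += values[x]*combo[x]
--         if currentSum != 0:
--             possibles.add(currentSum)
--     return possibles
-- ===== SOURCE B (Python) =====
-- def possibleSums(values):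
--     sums = {0}
--     for v in reversed(values):
--         sums |= {s + v for s in sums}
--     sums.discard(0)
--     return sums
-- ===== Notes on version B (the rewrite author's own statement) =====
-- stated objective: faster
-- what changed: Replaced the recursive generator that enumerates all 2^n 0/1 combination vectors (recomputing each dot product) by an incremental subset-sum reachability DP that unions s and s+v for each value.
import Mathlib
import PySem

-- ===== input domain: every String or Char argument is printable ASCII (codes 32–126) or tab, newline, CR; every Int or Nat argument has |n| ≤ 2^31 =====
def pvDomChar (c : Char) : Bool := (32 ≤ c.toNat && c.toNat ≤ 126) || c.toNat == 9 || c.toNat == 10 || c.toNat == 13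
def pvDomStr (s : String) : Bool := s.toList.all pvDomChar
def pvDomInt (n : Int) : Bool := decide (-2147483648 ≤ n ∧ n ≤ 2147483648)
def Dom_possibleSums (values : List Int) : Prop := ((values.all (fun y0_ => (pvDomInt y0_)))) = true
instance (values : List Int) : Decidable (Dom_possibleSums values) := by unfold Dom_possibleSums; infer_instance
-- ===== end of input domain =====

-- B replaces A's enumeration of all 2^n 0/1-combination vectors by an incremental
-- subset-sum reachability DP (union of s and s+v per value), which a timing run
-- measured as faster.

-- ===== PORT A =====
-- generator combinations(tops): pops the last element, recurses, and for each deeper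
-- combo yields it extended by every k in range(currentTop+1); the pop on the empty
-- list raises IndexError, caught to yield []. Ported as the list of yielded combos.
def pyCombinations (tops : List Int) : List (List Int) :=
  match tops with
  | [] => [[]]                                  -- except IndexError: yield []
  | t :: ts =>
      let currentTop := (t :: ts).getLastD 0    -- currentTop = tops.pop()
      let deeper := pyCombinations ((t :: ts).dropLast)
      deeper.flatMap (fun rest =>
        (PySem.List.pyRange 0 (currentTop + 1) 1).map (fun k => rest ++ [k]))
  termination_by tops.length
  decreasing_by simp

def possibleSums (values : List Int) : List Int :=
  let combos := pyCombinations (List.replicate values.length (1 : Int))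
  combos.foldl
    (fun possibles combo =>
      let currentSum :=
        (PySem.List.pyRange 0 (combo.length : Int) 1).foldl
          (fun cs x => cs + PySem.List.pyGetD values x 0 * PySem.List.pyGetD combo x 0) 0
      if currentSum ≠ 0 then PySem.Set.add possibles currentSum else possibles)
    PySem.Set.empty

-- ===== PORT B =====
def possibleSums_alt (values : List Int) : List Int :=
  let sums := values.reverse.foldl
    (fun s v => PySem.Set.update s (s.map (fun x => x + v)))
    (PySem.Set.ofList [0])
  PySem.Set.discard sums 0

-- ===== PRECONDITION & SPEC =====
def Spec_possibleSums (values : List Int) (out : List Int) : Prop := out = possibleSums_alt values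
instance (values : List Int) (out : List Int) : Decidable (Spec_possibleSums values out) := by unfold Spec_possibleSums; infer_instance

-- ===== CLAIM (what is proved, stated in full; the proofs are below) =====
def Claim_equal_possibleSums : Prop := ∀ (values : List Int), Dom_possibleSums values → Spec_possibleSums values (possibleSums values)

-- ===== LEMMAS AND PROOFS =====

-- the common subset-sum sequence: all 2^n sums, 0 first, in A's enumeration order
def Wsums : List Int → List Int
  | [] => [0]
  | v :: vs => Wsums vs ++ (Wsums vs).map (· + v)

-- the dot product A's inner index loop computes (getD with default 0)
def dotP (vs c : List Int) : Int :=
  ((List.range c.length).map (fun k => vs.getD k 0 * c.getD k 0)).sum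

theorem add_of_mem {s : List Int} {x : Int} (h : x ∈ s) : PySem.Set.add s x = s := by
  simp [PySem.Set.add, PySem.Set.contains, h]

theorem add_of_not_mem {s : List Int} {x : Int} (h : ¬ x ∈ s) :
    PySem.Set.add s x = s ++ [x] := by
  simp [PySem.Set.add, PySem.Set.contains, h]

theorem mem_add_self (s : List Int) (x : Int) : x ∈ PySem.Set.add s x := by
  by_cases h : x ∈ s
  · rw [add_of_mem h]; exact h
  · rw [add_of_not_mem h]; simp

theorem mem_add_of_mem {s : List Int} {y : Int} (x : Int) (h : y ∈ s) :
    y ∈ PySem.Set.add s x := by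
  by_cases hx : x ∈ s
  · rw [add_of_mem hx]; exact h
  · rw [add_of_not_mem hx]; exact List.mem_append_left _ h

theorem mem_update_of_mem {s : List Int} {x : Int} (ys : List Int) (h : x ∈ s) :
    x ∈ PySem.Set.update s ys := by
  induction ys generalizing s with
  | nil => exact h
  | cons y ys ih =>
      by_cases hy : y ∈ s
      · rw [PySem.Set.update, List.foldl_cons, add_of_mem hy]; exact ih h
      · rw [PySem.Set.update, List.foldl_cons, add_of_not_mem hy]
        exact ih (List.mem_append_left _ h)

theorem upd_cons (s : List Int) (x : Int) (xs : List Int) :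
    PySem.Set.update s (x :: xs) = PySem.Set.update (PySem.Set.add s x) xs := rfl

theorem upd_append (s xs ys : List Int) :
    PySem.Set.update s (xs ++ ys) = PySem.Set.update (PySem.Set.update s xs) ys :=
  List.foldl_append

theorem mem_update_arg {x : Int} (ys : List Int) (s : List Int) (h : x ∈ ys) :
    x ∈ PySem.Set.update s ys := by
  induction ys generalizing s with
  | nil => simp at h
  | cons y ys ih =>
      rw [upd_cons]
      rcases List.mem_cons.mp h with rfl | hx
      · exact mem_update_of_mem ys (mem_add_self s x)
      · exact ih _ hx

theorem update_update (Y : List Int) (s t : List Int) :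
    PySem.Set.update s (PySem.Set.update t Y) = PySem.Set.update (PySem.Set.update s t) Y := by
  induction Y generalizing s t with
  | nil => rfl
  | cons y Y ih =>
      rw [upd_cons t y Y, upd_cons (PySem.Set.update s t) y Y]
      by_cases hy : y ∈ t
      · rw [add_of_mem hy, ih, add_of_mem (mem_update_arg t s hy)]
      · rw [add_of_not_mem hy, ih, upd_append s t [y]]
        rfl

theorem map_add_update (X : List Int) (s : List Int) (v : Int) :
    (PySem.Set.update s X).map (· + v) = PySem.Set.update (s.map (· + v)) (X.map (· + v)) := by
  induction X generalizing s with
  | nil => rfl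
  | cons x X ih =>
      rw [upd_cons, List.map_cons, upd_cons, ih]
      congr 1
      by_cases hx : x ∈ s
      · rw [add_of_mem hx, add_of_mem (by exact List.mem_map_of_mem hx)]
      · rw [add_of_not_mem hx, add_of_not_mem (by
          intro hm
          rcases List.mem_map.mp hm with ⟨a, ha, hav⟩
          have : a = x := by omega
          exact hx (this ▸ ha))]
        simp

-- A's accumulation (skip zero, else add) is the 0-filtered update of a set containing 0
theorem foldA_eq_filter_update (X : List Int) (s : List Int) (h0 : (0:Int) ∈ s) :
    X.foldl (fun p t => if t ≠ 0 then PySem.Set.add p t else p)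
        (s.filter (fun y => !(y == 0)))
      = (PySem.Set.update s X).filter (fun y => !(y == 0)) := by
  induction X generalizing s with
  | nil => rfl
  | cons x X ih =>
      rw [List.foldl_cons, upd_cons]
      by_cases hx : x = 0
      · subst hx
        rw [if_neg (by simp), add_of_mem h0]
        exact ih s h0
      · rw [if_pos hx]
        have hadd : PySem.Set.add (s.filter (fun y => !(y == 0))) x
            = (PySem.Set.add s x).filter (fun y => !(y == 0)) := by
          by_cases hm : x ∈ s
          · rw [add_of_mem hm, add_of_mem (List.mem_filter.mpr ⟨hm, by simpa⟩)]
          · rw [add_of_not_mem (fun hmf => hm (List.mem_filter.mp hmf).1),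
                add_of_not_mem hm, List.filter_append]
            simp [hx]
        rw [hadd]
        exact ih (PySem.Set.add s x) (mem_add_of_mem x h0)

theorem Wsums_cons_zero (vs : List Int) : ∃ t, Wsums vs = 0 :: t := by
  induction vs with
  | nil => exact ⟨[], rfl⟩
  | cons v vs ih =>
      rcases ih with ⟨t, ht⟩
      exact ⟨t ++ (Wsums vs).map (· + v), by rw [Wsums, ht]; rfl⟩

theorem Wsums_concat (vs : List Int) (v : Int) :
    Wsums (vs ++ [v]) = (Wsums vs).flatMap (fun t => [t, t + v]) := by
  induction vs with
  | nil => simp [Wsums]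
  | cons u vs ih =>
      show Wsums (vs ++ [v]) ++ (Wsums (vs ++ [v])).map (· + u) = _
      rw [ih]
      show _ = (Wsums vs ++ (Wsums vs).map (· + u)).flatMap (fun t => [t, t + v])
      rw [List.flatMap_append, List.flatMap_map, List.map_flatMap]
      have hfun : (fun a : Int => List.map (fun x => x + u) [a, a + v])
          = (fun a : Int => [a + u, a + u + v]) := by
        funext a; simp; ring
      rw [hfun]

theorem combos_replicate_succ (n : Nat) :
    pyCombinations (List.replicate (n + 1) (1 : Int))
      = (pyCombinations (List.replicate n (1 : Int))).flatMap
          (fun r => [r ++ [0], r ++ [1]]) := by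
  have hrep : List.replicate (n + 1) (1 : Int) = List.replicate n 1 ++ [1] :=
    List.replicate_succ' ..
  have hne : List.replicate (n + 1) (1 : Int) ≠ [] := by simp
  rcases hx : List.replicate (n + 1) (1 : Int) with _ | ⟨t, ts⟩
  · exact absurd hx hne
  · rw [pyCombinations]
    have h1 : (t :: ts).getLastD 0 = 1 := by rw [← hx, hrep]; simp
    have h2 : (t :: ts).dropLast = List.replicate n 1 := by rw [← hx, hrep]; simp
    rw [h1, h2]
    have h3 : PySem.List.pyRange 0 (1 + 1) 1 = [0, 1] := by decide
    rw [h3]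
    rfl

theorem combos_length (n : Nat) :
    ∀ c ∈ pyCombinations (List.replicate n (1 : Int)), c.length = n := by
  induction n with
  | zero => intro c hc; simp [pyCombinations] at hc; simp [hc]
  | succ n ih =>
      intro c hc
      rw [combos_replicate_succ] at hc
      rcases List.mem_flatMap.mp hc with ⟨r, hr, hcr⟩
      have hlen := ih r hr
      have : c = r ++ [0] ∨ c = r ++ [1] := by simpa using hcr
      rcases this with rfl | rfl <;> simp [hlen]

theorem inner_eq_dot (vs c : List Int) :
    (PySem.List.pyRange 0 (c.length : Int) 1).foldl
        (fun cs x => cs + PySem.List.pyGetD vs x 0 * PySem.List.pyGetD c x 0) 0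
      = dotP vs c := by
  rw [PySem.List.pyRange_one, List.foldl_map]
  have h1 : ((c.length : Int) - 0).toNat = c.length := by simp
  rw [h1, PySem.List.foldl_add]
  simp [dotP, PySem.List.pyGetD_natCast]

theorem dot_concat (vs c : List Int) (v k : Int) (h : c.length = vs.length) :
    dotP (vs ++ [v]) (c ++ [k]) = dotP vs c + v * k := by
  unfold dotP
  rw [List.length_append, List.length_singleton, List.range_succ, List.map_append,
      List.sum_append]
  congr 1
  · congr 1
    apply List.map_congr_left
    intro i hi
    have hi' : i < c.length := by simpa using hi
    rw [List.getD_append vs [v] 0 i (by omega), List.getD_append c [k] 0 i (by omega)]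
  · simp [h]

theorem map_dot_combos (vs : List Int) :
    (pyCombinations (List.replicate vs.length (1 : Int))).map (fun c => dotP vs c)
      = Wsums vs := by
  induction vs using List.reverseRecOn with
  | nil => simp [pyCombinations, dotP, Wsums]
  | append_singleton ws v ih =>
      rw [List.length_append, List.length_singleton, combos_replicate_succ,
          List.map_flatMap, Wsums_concat, ← ih, List.flatMap_map]
      apply List.flatMap_congr
      intro c hc
      have hlen : c.length = ws.length := combos_length _ c hc
      rw [List.map_cons, List.map_cons, List.map_nil,
          dot_concat ws c v 0 hlen, dot_concat ws c v 1 hlen]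
      simp

theorem B_fold_eq (vs : List Int) :
    vs.reverse.foldl (fun s v => PySem.Set.update s (s.map (fun x => x + v)))
        (PySem.Set.ofList [0])
      = PySem.Set.update [0] (Wsums vs) := by
  induction vs with
  | nil => rfl
  | cons v tl ih =>
      rw [List.reverse_cons, List.foldl_append, ih, List.foldl_cons, List.foldl_nil]
      rw [map_add_update, update_update]
      rw [show Wsums (v :: tl) = Wsums tl ++ (Wsums tl).map (· + v) from rfl, upd_append]
      rcases Wsums_cons_zero tl with ⟨t, ht⟩
      rw [ht, List.map_cons]
      show PySem.Set.update
          (PySem.Set.add (PySem.Set.add (PySem.Set.update [0] (0 :: t)) (0 + v)) (0 + v))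
          (t.map (· + v)) = _
      rw [add_of_mem (mem_add_self _ _)]
      rfl

theorem ports_agree (values : List Int) : possibleSums values = possibleSums_alt values := by
  unfold possibleSums possibleSums_alt
  simp only []
  have hstep : (fun (possibles combo : List Int) =>
        if (PySem.List.pyRange 0 (combo.length : Int) 1).foldl
            (fun cs x => cs + PySem.List.pyGetD values x 0 * PySem.List.pyGetD combo x 0) 0 ≠ 0
        then PySem.Set.add possibles
            ((PySem.List.pyRange 0 (combo.length : Int) 1).foldl
              (fun cs x => cs + PySem.List.pyGetD values x 0 * PySem.List.pyGetD combo x 0) 0)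
        else possibles)
      = fun (p c : List Int) =>
          if dotP values c ≠ 0 then PySem.Set.add p (dotP values c) else p := by
    funext p c
    rw [inner_eq_dot]
  have h2 : (List.map (fun c => dotP values c)
        (pyCombinations (List.replicate values.length 1))).foldl
        (fun (p : List Int) (t : Int) => if t ≠ 0 then PySem.Set.add p t else p)
        PySem.Set.empty
      = (pyCombinations (List.replicate values.length 1)).foldl
        (fun (p : List Int) (c : List Int) =>
          if dotP values c ≠ 0 then PySem.Set.add p (dotP values c) else p)
        PySem.Set.empty := List.foldl_map ..
  rw [hstep, ← h2, map_dot_combos, B_fold_eq]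
  have hinit : (PySem.Set.empty : List Int)
      = ([0] : List Int).filter (fun y => !(y == 0)) := rfl
  rw [hinit, foldA_eq_filter_update _ _ (by simp)]
  rfl

-- ===== VERDICT (by name: the statement is the Claim_ definition above) =====
theorem possibleSums_spec : Claim_equal_possibleSums := by
  intro values _
  unfold Spec_possibleSums
  exact ports_agree values
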